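-- pv_equiv track=rewrite | github.com/Ashiq-am/Path-of-Python | 39.Python Programming Examples/6.Dictionary Programs/Count of groups having largest size while grouping according to sum of its digits/Code.py | constDict
-- ===== SOURCE A (Python) =====
-- def constDict(n):
--     # dictionary that contain
--     # unique sum count
--     d = {}
--
--     for i in range(1, n + 1):
--
--         # convert each number to string
--         s = str(i)
--
--         # make list of number digits
--         l = list(s)
--
--         # calculate the sum of its digits
--         sum1 = sum(map(int, l))
--
--         if sum1 not in d:
--             d[sum1] = 1
--
--         else:
--             d[sum1] += 1
--
--     return d
-- ===== SOURCE B (Python) =====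
-- def constDict(n):
--     # Process numbers decade by decade: the digit sum of every number in
--     # [10*p, 10*p+9] is digitsum(p) + last_digit, so the digit sum is computed
--     # once per ten numbers (arithmetically, no string conversion).
--     d = {}
--     for p in range(0, n // 10 + 1):
--         # digit sum of the decade prefix p
--         sp = 0
--         x = p
--         while x > 0:
--             sp += x % 10
--             x //= 10
--         lo = max(1, 10 * p)
--         hi = min(n, 10 * p + 9)
--         for i in range(lo, hi + 1):
--             s = sp + (i - 10 * p)
--             d[s] = d.get(s, 0) + 1
--     return d
-- ===== Notes on version B (the rewrite author's own statement) =====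
-- stated objective: faster
-- what changed: B walks the range decade by decade: it computes the digit sum of the ten-number prefix once arithmetically (no string conversion) and derives each number's digit sum as prefix-sum + last digit, instead of A's per-number str/map/int digitization.
import Mathlib
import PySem

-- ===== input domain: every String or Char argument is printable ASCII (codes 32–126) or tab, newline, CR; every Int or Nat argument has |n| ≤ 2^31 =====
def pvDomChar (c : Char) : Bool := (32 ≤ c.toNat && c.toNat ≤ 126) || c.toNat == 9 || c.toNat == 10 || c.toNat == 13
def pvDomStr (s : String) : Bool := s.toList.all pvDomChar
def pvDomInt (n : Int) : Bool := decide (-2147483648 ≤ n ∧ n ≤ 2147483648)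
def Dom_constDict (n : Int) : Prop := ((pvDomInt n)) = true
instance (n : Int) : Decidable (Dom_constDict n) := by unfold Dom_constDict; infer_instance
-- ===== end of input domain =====

-- B processes the range decade by decade, computing each decade prefix's digit sum once
-- arithmetically instead of A's per-number str/map/int digitization (objective: faster).

-- ===== PORT A =====
def constDict (n : Int) : List (Int × Int) :=
  ((PySem.List.pyRange 1 (n + 1)).foldl (fun d i =>
      let s := PySem.Int.toStr i                 -- s = str(i)
      let l := s.toList                          -- l = list(s)
      -- sum1 = sum(map(int, l)); int(c) on a single digit char never raises
      let sum1 := (l.map (fun c => (PySem.Int.ofChars? [c]).getD 0)).sum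
      if d.contains sum1 = false then d.insert sum1 1          -- if sum1 not in d: d[sum1] = 1
      else d.insert sum1 ((d.get? sum1).getD 0 + 1)            -- else: d[sum1] += 1 (key present)
    ) PySem.Dict.empty).items

-- ===== PORT B =====
-- sp/x while-loop of Source B: while x > 0: sp += x % 10; x //= 10
def bDigitSum (x : Int) (sp : Int) : Int :=
  if _h : 0 < x then bDigitSum (PySem.Int.floordiv x 10) (sp + PySem.Int.mod x 10) else sp
termination_by x.toNat
decreasing_by
  rw [PySem.Int.floordiv_eq_ediv_of_pos (by omega)]
  omega

def constDict_alt (n : Int) : List (Int × Int) :=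
  ((PySem.List.pyRange 0 (PySem.Int.floordiv n 10 + 1)).foldl (fun d p =>
      let sp := bDigitSum p 0
      let lo := max 1 (10 * p)
      let hi := min n (10 * p + 9)
      (PySem.List.pyRange lo (hi + 1)).foldl (fun d i =>
        -- d[s] = d.get(s, 0) + 1
        d.insert (sp + (i - 10 * p)) (d.getD (sp + (i - 10 * p)) 0 + 1)) d
    ) PySem.Dict.empty).items

-- ===== PRECONDITION & SPEC =====
def Spec_constDict (n : Int) (out : List (Int × Int)) : Prop := out = constDict_alt n
instance (n : Int) (out : List (Int × Int)) : Decidable (Spec_constDict n out) := by unfold Spec_constDict; infer_instance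

-- ===== CLAIM (what is proved, stated in full; the proofs are below) =====
def Claim_equal_constDict : Prop := ∀ (n : Int), Dom_constDict n → Spec_constDict n (constDict n)

-- ===== LEMMAS AND PROOFS =====

-- the digit-sum key A computes for i
def kA (i : Int) : Int := ((PySem.Int.toStr i).toList.map (fun c => (PySem.Int.ofChars? [c]).getD 0)).sum

-- the uniform dict update both ports perform
def dstep (d : PySem.Dict Int Int) (k : Int) : PySem.Dict Int Int := d.insert k (d.getD k 0 + 1)

-- mathematical digit sum on Nat
def nds (m : Nat) : Nat := if m = 0 then 0 else nds (m / 10) + m % 10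
decreasing_by omega

lemma stepA_eq (d : PySem.Dict Int Int) (k : Int) :
    (if d.contains k = false then d.insert k 1 else d.insert k ((d.get? k).getD 0 + 1)) = dstep d k := by
  unfold dstep
  rcases h : d.contains k with _ | _
  · rw [if_pos rfl, PySem.Dict.getD_eq_get?_getD, (PySem.Dict.get?_eq_none_iff_contains d k).mpr h]
    rfl
  · rw [if_neg (by simp), PySem.Dict.getD_eq_get?_getD]

lemma tdc_append (f : Nat) : ∀ (n : Nat) (l : List Char),
    Nat.toDigitsCore 10 f n l = Nat.toDigitsCore 10 f n [] ++ l := by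
  induction f with
  | zero => intro n l; simp [Nat.toDigitsCore]
  | succ f ih =>
    intro n l
    simp only [Nat.toDigitsCore]
    by_cases h : n / 10 = 0
    · simp [h]
    · simp only [h, if_false]
      rw [ih (n / 10) [Nat.digitChar (n % 10)], ih (n / 10) (Nat.digitChar (n % 10) :: l)]
      simp

lemma tdc_fuel : ∀ (n : Nat), ∀ (f f' : Nat), n < f → n < f' →
    Nat.toDigitsCore 10 f n [] = Nat.toDigitsCore 10 f' n [] := by
  intro n
  induction n using Nat.strong_induction_on with
  | _ n ih =>
    intro f f' hf hf'
    match f, f' with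
    | f + 1, f' + 1 =>
      simp only [Nat.toDigitsCore]
      by_cases h : n / 10 = 0
      · simp [h]
      · simp only [h, if_false]
        rw [tdc_append f, tdc_append f', ih (n / 10) (by omega) f f' (by omega) (by omega)]

lemma toDigits_small {m : Nat} (h : m < 10) : Nat.toDigits 10 m = [Nat.digitChar m] := by
  unfold Nat.toDigits
  simp [Nat.toDigitsCore, Nat.div_eq_of_lt h, Nat.mod_eq_of_lt h]

lemma toDigits_step {m : Nat} (h : 10 ≤ m) :
    Nat.toDigits 10 m = Nat.toDigits 10 (m / 10) ++ [Nat.digitChar (m % 10)] := by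
  unfold Nat.toDigits
  have h0 : m / 10 ≠ 0 := by omega
  conv_lhs => rw [show m + 1 = (m) + 1 from rfl]
  simp only [Nat.toDigitsCore, h0, if_false]
  rw [tdc_append m]
  congr 1
  exact tdc_fuel (m / 10) m (m / 10 + 1) (by omega) (by omega)

lemma dval_digitChar {d : Nat} (h : d < 10) :
    (PySem.Int.ofChars? [Nat.digitChar d]).getD 0 = (d : Int) := by
  interval_cases d <;> decide

lemma nds_zero : nds 0 = 0 := by unfold nds; simp

lemma nds_small {m : Nat} (h : m < 10) : nds m = m := by
  by_cases h0 : m = 0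
  · simp [h0, nds_zero]
  · unfold nds
    rw [if_neg h0, Nat.div_eq_of_lt h, nds_zero, Nat.mod_eq_of_lt h]
    omega

lemma sum_toDigits : ∀ (m : Nat),
    ((Nat.toDigits 10 m).map (fun c => (PySem.Int.ofChars? [c]).getD 0)).sum = (nds m : Int) := by
  intro m
  induction m using Nat.strong_induction_on with
  | _ m ih =>
    by_cases h : m < 10
    · rw [toDigits_small h]
      simp only [List.map_cons, List.map_nil, List.sum_cons, List.sum_nil]
      rw [dval_digitChar h, nds_small h]
      simp
    · rw [toDigits_step (by omega)]
      rw [List.map_append, List.sum_append, ih (m / 10) (by omega)]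
      simp only [List.map_cons, List.map_nil, List.sum_cons, List.sum_nil]
      rw [dval_digitChar (Nat.mod_lt m (by omega))]
      conv_rhs => rw [show m = m from rfl]; unfold nds
      rw [if_neg (by omega)]
      push_cast
      ring

lemma kA_eq (i : Int) (h : 0 ≤ i) : kA i = (nds i.toNat : Int) := by
  unfold kA
  rw [show (PySem.Int.toStr i).toList = PySem.Int.toChars i from PySem.Int.toList_toStr i]
  unfold PySem.Int.toChars
  rw [if_neg (by omega)]
  exact sum_toDigits i.toNat

lemma nds_decade (p r : Nat) (hr : r < 10) : nds (10 * p + r) = nds p + r := by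
  by_cases h0 : 10 * p + r = 0
  · have hp : p = 0 := by omega
    have : r = 0 := by omega
    simp [hp, this, nds]
  · conv_lhs => unfold nds
    rw [if_neg h0]
    have h1 : (10 * p + r) / 10 = p := by omega
    have h2 : (10 * p + r) % 10 = r := by omega
    rw [h1, h2]

lemma bDigitSum_eq (x : Int) (hx : 0 ≤ x) : ∀ (sp : Int), bDigitSum x sp = sp + (nds x.toNat : Int) := by
  generalize hm : x.toNat = m
  induction m using Nat.strong_induction_on generalizing x with
  | _ m ih =>
    intro sp
    rw [bDigitSum]
    by_cases h : 0 < x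
    · rw [dif_pos h]
      have hdiv : PySem.Int.floordiv x 10 = x / 10 := PySem.Int.floordiv_eq_ediv_of_pos (by omega)
      have hmod : PySem.Int.mod x 10 = x % 10 := PySem.Int.mod_eq_emod_of_pos (by omega)
      rw [hdiv, hmod, ih (x / 10).toNat (by omega) (x / 10) (by omega) rfl]
      have hsplit : m = 10 * (x / 10).toNat + (x % 10).toNat := by omega
      rw [hsplit, nds_decade _ _ (by omega)]
      push_cast
      omega
    · rw [dif_neg h]
      have : m = 0 := by omega
      rw [this, nds_zero]
      simp

-- the inner index range B visits for decade p
def seg (n p : Int) : List Int := PySem.List.pyRange (max 1 (10 * p)) (min n (10 * p + 9) + 1)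

lemma glue (n : Int) : ∀ (q : Nat), (q : Int) ≤ PySem.Int.floordiv n 10 →
    (PySem.List.pyRange 0 (q : Int)).flatMap (seg n) = PySem.List.pyRange 1 (10 * (q : Int)) := by
  intro q
  induction q with
  | zero => intro _; simp [PySem.List.pyRange_one_eq_nil]
  | succ q ih =>
    intro hq
    have hq' : (q : Int) ≤ PySem.Int.floordiv n 10 := by push_cast at hq ⊢; omega
    have hdiv : 10 * ((q : Int) + 1) ≤ n := by
      have := (PySem.Int.floordiv_eq_iff_of_pos (a := n) (b := 10) (q := PySem.Int.floordiv n 10) (by omega)).mp rfl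
      push_cast at hq ⊢
      omega
    push_cast
    rw [PySem.List.pyRange_one_succ_right (by positivity), List.flatMap_append]
    rw [show (PySem.List.pyRange 0 (q : Int)).flatMap (seg n) = PySem.List.pyRange 1 (10 * (q : Int)) from ih hq']
    have hseg : seg n (q : Int) = PySem.List.pyRange (max 1 (10 * (q : Int))) (10 * (q : Int) + 10) := by
      unfold seg
      have : min n (10 * (q : Int) + 9) = 10 * (q : Int) + 9 := by omega
      rw [this]
      ring_nf
    simp only [List.flatMap_cons, List.flatMap_nil, List.append_nil, hseg]
    by_cases hq0 : q = 0
    · subst hq0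
      simp [PySem.List.pyRange_one_eq_nil]
    · have h1 : (1 : Int) ≤ 10 * (q : Int) := by
        have : 1 ≤ (q : Int) := by exact_mod_cast Nat.one_le_iff_ne_zero.mpr hq0
        omega
      rw [max_eq_right (by omega)]
      rw [← PySem.List.pyRange_one_append 1 (10 * (q : Int)) (10 * (q : Int) + 10) h1 (by omega)]
      ring_nf

lemma flat_segs (n : Int) (hn : 1 ≤ n) :
    (PySem.List.pyRange 0 (PySem.Int.floordiv n 10 + 1)).flatMap (seg n) = PySem.List.pyRange 1 (n + 1) := by
  have hq0 : 0 ≤ PySem.Int.floordiv n 10 := by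
    have := (PySem.Int.floordiv_eq_iff_of_pos (a := n) (b := 10) (q := PySem.Int.floordiv n 10) (by omega)).mp rfl
    omega
  obtain ⟨q, hq⟩ : ∃ q : Nat, (q : Int) = PySem.Int.floordiv n 10 := ⟨(PySem.Int.floordiv n 10).toNat, by omega⟩
  have hbr := (PySem.Int.floordiv_eq_iff_of_pos (a := n) (b := 10) (q := PySem.Int.floordiv n 10) (by omega)).mp rfl
  rw [← hq] at hbr ⊢
  rw [PySem.List.pyRange_one_succ_right (by positivity), List.flatMap_append]
  rw [glue n q (by omega)]
  have hseg : seg n (q : Int) = PySem.List.pyRange (max 1 (10 * (q : Int))) (n + 1) := by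
    unfold seg
    rw [min_eq_left (by omega)]
  simp only [List.flatMap_cons, List.flatMap_nil, List.append_nil, hseg]
  by_cases hq0' : q = 0
  · subst hq0'
    simp [PySem.List.pyRange_one_eq_nil]
  · have h1 : (1 : Int) ≤ 10 * (q : Int) := by
      have : 1 ≤ (q : Int) := by exact_mod_cast Nat.one_le_iff_ne_zero.mpr hq0'
      omega
    rw [max_eq_right (by omega)]
    exact (PySem.List.pyRange_one_append 1 (10 * (q : Int)) (n + 1) h1 (by omega)).symm

lemma A_eq (n : Int) : constDict n =
    ((PySem.List.pyRange 1 (n + 1)).foldl (fun d i => dstep d (kA i)) PySem.Dict.empty).items := by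
  unfold constDict
  congr 1
  apply PySem.List.foldl_congr_mem
  intro acc i _
  exact stepA_eq acc (kA i)

lemma key_eq (n p i : Int) (hp : 0 ≤ p) (hi : i ∈ seg n p) :
    bDigitSum p 0 + (i - 10 * p) = kA i := by
  have hb := PySem.List.mem_pyRange_one.mp hi
  have h1 : 1 ≤ i := by omega
  have h10 : 10 * p ≤ i := by omega
  have h9 : i ≤ 10 * p + 9 := by omega
  rw [kA_eq i (by omega), bDigitSum_eq p hp 0]
  have hsplit : i.toNat = 10 * p.toNat + (i - 10 * p).toNat := by omega
  rw [hsplit, nds_decade _ _ (by omega)]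
  push_cast
  omega

lemma B_eq (n : Int) : constDict_alt n =
    (((PySem.List.pyRange 0 (PySem.Int.floordiv n 10 + 1)).flatMap (seg n)).foldl
      (fun d i => dstep d (kA i)) PySem.Dict.empty).items := by
  unfold constDict_alt
  rw [List.foldl_flatMap]
  congr 1
  apply PySem.List.foldl_congr_mem
  intro acc p hp
  have hp0 : 0 ≤ p := (PySem.List.mem_pyRange_one.mp hp).1
  apply PySem.List.foldl_congr_mem
  intro d i hi
  show d.insert (bDigitSum p 0 + (i - 10 * p)) (d.getD (bDigitSum p 0 + (i - 10 * p)) 0 + 1) = dstep d (kA i)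
  rw [key_eq n p i hp0 hi]
  rfl

-- ===== VERDICT (by name: the statement is the Claim_ definition above) =====
theorem constDict_spec : Claim_equal_constDict := by
  intro n _
  unfold Spec_constDict
  rw [A_eq, B_eq]
  by_cases hn : 1 ≤ n
  · rw [flat_segs n hn]
  · by_cases h0 : n = 0
    · subst h0; decide
    · have hbr := (PySem.Int.floordiv_eq_iff_of_pos (a := n) (b := 10)
        (q := PySem.Int.floordiv n 10) (by omega)).mp rfl
      rw [PySem.List.pyRange_one_eq_nil (show n + 1 ≤ 1 by omega),
        PySem.List.pyRange_one_eq_nil (show PySem.Int.floordiv n 10 + 1 ≤ 0 by omega)]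
      rfl
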